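-- pv_equiv track=rewrite | github.com/leonado10000/CP | 890. Find and Replace Pattern.py | drive_number
-- ===== SOURCE A (Python) =====
-- def drive_number(k : str ):
--     cart = []
--     dem = []
--     for i in range(len(k)):
--         if k[i] not in cart:
--             cart.append(k[i])
--             dem.append(i)
--         else :
--             c = cart.index(k[i])
--             dem.append(c)
--     return dem
-- ===== SOURCE B (Python) =====
-- def drive_number(k : str ):
--     # no stateful scan: per distinct character, closed-form tables —
--     # first occurrence via k.index, rank = number of distinct characters
--     # strictly before that first occurrence — then a stateless emission pass
--     distinct = dict.fromkeys(k)
--     first = {ch: k.index(ch) for ch in distinct}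
--     rank = {ch: len(set(k[:first[ch]])) for ch in distinct}
--     return [i if first[ch] == i else rank[ch] for i, ch in enumerate(k)]
-- ===== Notes on version B (the rewrite author's own statement) =====
-- stated objective: alternative
-- what changed: Replaces A's stateful left-to-right scan that maintains a growing seen-list with membership tests and .index calls by closed-form per-character tables (dict.fromkeys for the distinct characters, first[ch]=k.index(ch), rank[ch]=len(set(k[:first[ch]]))) followed by a stateless emission comprehension.
import Mathlib
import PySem

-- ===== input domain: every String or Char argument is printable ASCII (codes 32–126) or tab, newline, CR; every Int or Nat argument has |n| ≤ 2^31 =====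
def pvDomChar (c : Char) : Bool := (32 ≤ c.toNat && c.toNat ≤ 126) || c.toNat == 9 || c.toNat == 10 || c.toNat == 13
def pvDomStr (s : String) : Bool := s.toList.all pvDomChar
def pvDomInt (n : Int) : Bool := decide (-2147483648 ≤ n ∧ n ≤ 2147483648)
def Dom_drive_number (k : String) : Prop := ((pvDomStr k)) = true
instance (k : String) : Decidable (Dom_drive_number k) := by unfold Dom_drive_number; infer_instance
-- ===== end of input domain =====

-- B replaces A's stateful scan (growing seen-list, membership test and .index per step) by
-- per-character closed-form tables (first occurrence via k.index, rank = number of distinct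
-- characters before it) followed by a stateless emission pass.

-- ===== PORT A =====
-- one loop step of A: if the char is unseen, append char and position i; else append its index in the seen-list
def aStep (st : List Char × List Int) (p : Int × Char) : List Char × List Int :=
  if p.2 ∉ st.1 then (st.1 ++ [p.2], st.2 ++ [p.1])
  else (st.1, st.2 ++ [(((PySem.List.index? st.1 p.2).getD 0 : Nat) : Int)])
  -- .getD 0: in the else branch p.2 ∈ st.1, so Python's .index cannot raise

def drive_number (k : String) : List Int :=
  ((PySem.List.enumerate k.toList 0).foldl aStep ([], [])).2

-- ===== PORT B =====
-- dict comprehension {ch: k.index(ch) for ch in dict.fromkeys(k)}; dict.fromkeys(k) = PySem.List.dedup;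
-- k.index(ch) with ch a character of k = PySem.List.index? (exact: one-char substring search, cannot raise)
def firstDict (l : List Char) : PySem.Dict Char Int :=
  (PySem.List.dedup l).foldl
    (fun d ch => d.insert ch (((PySem.List.index? l ch).getD 0 : Nat) : Int)) PySem.Dict.empty

-- dict comprehension {ch: len(set(k[:first[ch]])) for ch in dict.fromkeys(k)}
def rankDict (l : List Char) (fd : PySem.Dict Char Int) : PySem.Dict Char Int :=
  (PySem.List.dedup l).foldl
    (fun d ch =>
      d.insert ch ((PySem.Set.ofList (PySem.List.slice l none (some (fd.getD ch 0)))).length : Int))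
    PySem.Dict.empty

-- comprehension body: i if first[ch] == i else rank[ch]
-- (first[ch]/rank[ch] cannot raise KeyError — every character of k is a key — hence .getD 0)
def bEmit2 (fd rd : PySem.Dict Char Int) (p : Int × Char) : Int :=
  if fd.getD p.2 0 = p.1 then p.1 else rd.getD p.2 0

def drive_number_alt (k : String) : List Int :=
  (PySem.List.enumerate k.toList 0).map
    (bEmit2 (firstDict k.toList) (rankDict k.toList (firstDict k.toList)))

-- ===== PRECONDITION & SPEC =====
def Spec_drive_number (k : String) (out : List Int) : Prop := out = drive_number_alt k
instance (k : String) (out : List Int) : Decidable (Spec_drive_number k out) := by unfold Spec_drive_number; infer_instance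

-- ===== CLAIM (what is proved, stated in full; the proofs are below) =====
def Claim_equal_drive_number : Prop := ∀ (k : String), Dom_drive_number k → Spec_drive_number k (drive_number k)

-- ===== LEMMAS AND PROOFS =====

-- proof-side closed form for one output element: i on a first occurrence,
-- else the number of distinct characters before the first occurrence
def bEmit (l : List Char) (p : Int × Char) : Int :=
  if (((PySem.List.index? l p.2).getD 0 : Nat) : Int) = p.1 then p.1
  else ((PySem.Set.ofList (PySem.List.slice l none
          (some (((PySem.List.index? l p.2).getD 0 : Nat) : Int)))).length : Int)

lemma get?_foldl_insert_of_not_mem {K V : Type} [BEq K] [LawfulBEq K] (f : K → V)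
    (xs : List K) (d : PySem.Dict K V) {ch : K} (h : ch ∉ xs) :
    (xs.foldl (fun d x => d.insert x (f x)) d).get? ch = d.get? ch := by
  induction xs generalizing d with
  | nil => rfl
  | cons x xs ih =>
    simp only [List.mem_cons, not_or] at h
    rw [List.foldl_cons, ih _ h.2, PySem.Dict.get?_insert_of_ne _ _ h.1]

lemma get?_foldl_insert_self {K V : Type} [BEq K] [LawfulBEq K] (f : K → V)
    (xs : List K) (d : PySem.Dict K V) (hx : xs.Nodup) {ch : K} (h : ch ∈ xs) :
    (xs.foldl (fun d x => d.insert x (f x)) d).get? ch = some (f ch) := by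
  induction xs generalizing d with
  | nil => simp at h
  | cons x xs ih =>
    rw [List.foldl_cons]
    rcases List.mem_cons.1 h with rfl | hmem
    · rw [get?_foldl_insert_of_not_mem _ _ _ (List.nodup_cons.1 hx).1,
        PySem.Dict.get?_insert_self]
    · exact ih (d.insert x (f x)) (List.nodup_cons.1 hx).2 hmem

-- the precomputed tables reproduce the closed form for every character of k
lemma emit_agree (l : List Char) (p : Int × Char) (hp : p.2 ∈ l) :
    bEmit2 (firstDict l) (rankDict l (firstDict l)) p = bEmit l p := by
  have hm : p.2 ∈ PySem.List.dedup l := (PySem.List.mem_dedup _ _).2 hp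
  have hfd : (firstDict l).getD p.2 0 = (((PySem.List.index? l p.2).getD 0 : Nat) : Int) := by
    unfold firstDict
    rw [PySem.Dict.getD_eq_get?_getD,
      get?_foldl_insert_self _ _ _ (PySem.List.nodup_dedup l) hm, Option.getD_some]
  have hrd : (rankDict l (firstDict l)).getD p.2 0
      = ((PySem.Set.ofList (PySem.List.slice l none
          (some (((PySem.List.index? l p.2).getD 0 : Nat) : Int)))).length : Int) := by
    unfold rankDict
    rw [PySem.Dict.getD_eq_get?_getD,
      get?_foldl_insert_self _ _ _ (PySem.List.nodup_dedup l) hm, Option.getD_some, hfd]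
  unfold bEmit2 bEmit
  rw [hfd, hrd]

lemma dedup_append_singleton (l : List Char) (c : Char) :
    PySem.List.dedup (l ++ [c]) = if c ∈ l then PySem.List.dedup l else PySem.List.dedup l ++ [c] := by
  simp only [PySem.List.dedup_eq_ofList, PySem.Set.ofList_append, PySem.Set.update_cons,
    PySem.Set.update_nil, PySem.Set.add]
  simp [PySem.Set.mem_ofList]

lemma index?_append_singleton_none {l : List Char} {c ch : Char} (h : ch ∉ l) (hne : ch ≠ c) :
    PySem.List.index? (l ++ [c]) ch = none := by
  rw [PySem.List.index?_eq_none_iff]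
  simp [h, hne]


-- the rank of a repeated character in the dedup list is the number of distinct
-- characters strictly before its first occurrence
lemma rank_eq (l : List Char) (c : Char) (f : Nat) (h : PySem.List.index? l c = some f) :
    PySem.List.index? (PySem.List.dedup l) c = some (PySem.List.dedup (l.take f)).length := by
  induction l using List.reverseRecOn generalizing f with
  | nil => simp at h
  | append_singleton l c' ih =>
    by_cases hc : c ∈ l
    · rw [PySem.List.index?_append_of_mem _ hc] at h
      obtain ⟨hflt, -, -⟩ := PySem.List.getElem_of_index?_eq_some h
      have htake : (l ++ [c']).take f = l.take f := by
        rw [List.take_append_of_le_length (Nat.le_of_lt hflt)]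
      have hcd : c ∈ PySem.List.dedup l := (PySem.List.mem_dedup _ _).2 hc
      rw [htake, dedup_append_singleton]
      split_ifs
      · exact ih f h
      · rw [PySem.List.index?_append_of_mem _ hcd]; exact ih f h
    · by_cases hcc : c = c'
      · subst hcc
        rw [PySem.List.index?_append_singleton_self l c hc] at h
        obtain rfl : f = l.length := by injection h; omega
        have hcd : c ∉ PySem.List.dedup l := fun hm => hc ((PySem.List.mem_dedup _ _).1 hm)
        rw [dedup_append_singleton, if_neg hc,
          PySem.List.index?_append_singleton_self _ c hcd, List.take_append_of_le_length le_rfl]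
        simp
      · rw [index?_append_singleton_none hc hcc] at h; exact absurd h (by simp)

-- bEmit is unchanged by appending a character, for positions inside the old list
lemma bEmit_stable (l : List Char) (c : Char) (p : Int × Char) (hp : p.2 ∈ l) :
    bEmit (l ++ [c]) p = bEmit l p := by
  obtain ⟨f, hf⟩ : ∃ f, PySem.List.index? l p.2 = some f :=
    Option.isSome_iff_exists.1 ((PySem.List.index?_isSome_iff l p.2).2 hp)
  obtain ⟨hflt, -, -⟩ := PySem.List.getElem_of_index?_eq_some hf
  have hf' : PySem.List.index? (l ++ [c]) p.2 = some f :=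
    (PySem.List.index?_append_of_mem _ hp).trans hf
  unfold bEmit
  rw [hf, hf', PySem.List.slice_to_natCast, PySem.List.slice_to_natCast, Option.getD_some,
    List.take_append_of_le_length (Nat.le_of_lt hflt)]

-- the joint invariant of A's loop, by induction on the string from the right
lemma master (l : List Char) :
    ((PySem.List.enumerate l 0).foldl aStep ([], [])).1 = PySem.List.dedup l
  ∧ ((PySem.List.enumerate l 0).foldl aStep ([], [])).2
      = (PySem.List.enumerate l 0).map (bEmit l) := by
  induction l using List.reverseRecOn with
  | nil => exact ⟨rfl, rfl⟩
  | append_singleton l c ih =>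
    obtain ⟨h1, h2⟩ := ih
    have henum : PySem.List.enumerate (l ++ [c]) 0
        = PySem.List.enumerate l 0 ++ [((l.length : Int), c)] := by
      rw [PySem.List.enumerate_append]; simp [PySem.List.enumerate]
    have hfa : (PySem.List.enumerate (l ++ [c]) 0).foldl aStep ([], [])
        = aStep ((PySem.List.enumerate l 0).foldl aStep ([], [])) ((l.length : Int), c) := by
      rw [henum, List.foldl_append]; rfl
    have hstab : (PySem.List.enumerate l 0).map (bEmit (l ++ [c]))
        = (PySem.List.enumerate l 0).map (bEmit l) := by
      refine List.map_congr_left (fun p hp => ?_)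
      obtain ⟨j, hj, rfl⟩ := (PySem.List.mem_enumerate_iff l 0 p).1 hp
      exact bEmit_stable l c _ (l.getElem_mem hj)
    constructor
    · rw [hfa, dedup_append_singleton]
      by_cases hc : c ∈ l <;> simp [aStep, h1, hc]
    · rw [hfa, henum, List.map_append, hstab, ← h2]
      by_cases hc : c ∈ l
      · -- repeated character: A emits the seen-list index, B emits the distinct-prefix count
        obtain ⟨f, hf⟩ : ∃ f, PySem.List.index? l c = some f :=
          Option.isSome_iff_exists.1 ((PySem.List.index?_isSome_iff l c).2 hc)
        obtain ⟨hflt, -, -⟩ := PySem.List.getElem_of_index?_eq_some hf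
        have hf' : PySem.List.index? (l ++ [c]) c = some f :=
          (PySem.List.index?_append_of_mem _ hc).trans hf
        have hne : ((f : Int) ≠ (l.length : Int)) := by exact_mod_cast Nat.ne_of_lt hflt
        have hmem : c ∈ PySem.List.dedup l := (PySem.List.mem_dedup _ _).2 hc
        have hrank := rank_eq l c f hf
        have hB : bEmit (l ++ [c]) ((l.length : Int), c)
            = ((PySem.List.dedup (l.take f)).length : Int) := by
          unfold bEmit
          rw [hf', Option.getD_some, if_neg hne, PySem.List.slice_to_natCast,
            List.take_append_of_le_length (Nat.le_of_lt hflt)]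
          simp
        simp only [List.map_cons, List.map_nil, hB]
        simp only [aStep, h1]
        rw [if_neg (by simp [hc]), hrank]
        rfl
      · -- fresh character: both emit the position l.length
        have hf' : PySem.List.index? (l ++ [c]) c = some l.length :=
          PySem.List.index?_append_singleton_self l c hc
        have hcd : c ∉ PySem.List.dedup l := fun hm => hc ((PySem.List.mem_dedup _ _).1 hm)
        have hB : bEmit (l ++ [c]) ((l.length : Int), c) = (l.length : Int) := by
          unfold bEmit; rw [hf']; simp
        simp only [List.map_cons, List.map_nil, hB]
        simp [aStep, h1, hc]

-- ===== VERDICT (by name: the statement is the Claim_ definition above) =====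
theorem drive_number_spec : Claim_equal_drive_number := by
  intro k _
  unfold Spec_drive_number drive_number drive_number_alt
  rw [(master k.toList).2]
  refine List.map_congr_left (fun p hp => ?_)
  obtain ⟨j, hj, rfl⟩ := (PySem.List.mem_enumerate_iff k.toList 0 p).1 hp
  exact (emit_agree k.toList _ (k.toList.getElem_mem hj)).symm
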